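-- pv_equiv track=rewrite | github.com/mohammadfaiizan/ProjectI | DSA/Problem/Dynamic Programming/04_Longest_Subsequence/1713_Minimum_Operations_to_Make_a_Subsequence.py | min_operations_lis_transformation
-- ===== SOURCE A (Python) =====
-- def min_operations_lis_transformation(target, arr):
--     """
--     LIS TRANSFORMATION APPROACH (OPTIMAL):
--     =====================================
--     Transform to LIS problem using coordinate mapping.
--
--     Time Complexity: O(m log m) - LIS with binary search
--     Space Complexity: O(m) - LIS array
--     """
--     # Map target elements to their positions
--     target_pos = {val: i for i, val in enumerate(target)}
--
--     # Convert arr to sequence of target positions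
--     positions = []
--     for val in arr:
--         if val in target_pos:
--             positions.append(target_pos[val])
--
--     # Find LIS in positions - this gives us the LCS length
--     def lis_binary_search(nums):
--         if not nums:
--             return 0
--
--         import bisect
--         tails = []
--
--         for num in nums:
--             idx = bisect.bisect_left(tails, num)
--             if idx == len(tails):
--                 tails.append(num)
--             else:
--                 tails[idx] = num
--
--         return len(tails)
--
--     max_common = lis_binary_search(positions)
--     return len(target) - max_common
-- ===== SOURCE B (Python) =====
-- def min_operations_lis_transformation(target, arr):
--     # Same coordinate mapping as A, but the LIS is computed with the classic
--     # quadratic DP table instead of patience sorting / binary search.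
--     target_pos = {val: i for i, val in enumerate(target)}
--     positions = [target_pos[v] for v in arr if v in target_pos]
--
--     # table[i] = (position value, length of longest strictly increasing
--     # subsequence of positions ending at index i)
--     table = []
--     for p in positions:
--         m = 0
--         for (q, d) in table:
--             if q < p and d > m:
--                 m = d
--         table.append((p, m + 1))
--
--     best = 0
--     for (_, d) in table:
--         if d > best:
--             best = d
--     return len(target) - best
-- ===== Notes on version B (the rewrite author's own statement) =====
-- stated objective: alternative
-- what changed: The patience-sorting/bisect LIS subroutine is replaced by the classic quadratic DP table (dp[i] = 1 + max dp[j] over earlier strictly smaller positions), with the same coordinate-mapping preprocessing.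
import Mathlib
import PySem

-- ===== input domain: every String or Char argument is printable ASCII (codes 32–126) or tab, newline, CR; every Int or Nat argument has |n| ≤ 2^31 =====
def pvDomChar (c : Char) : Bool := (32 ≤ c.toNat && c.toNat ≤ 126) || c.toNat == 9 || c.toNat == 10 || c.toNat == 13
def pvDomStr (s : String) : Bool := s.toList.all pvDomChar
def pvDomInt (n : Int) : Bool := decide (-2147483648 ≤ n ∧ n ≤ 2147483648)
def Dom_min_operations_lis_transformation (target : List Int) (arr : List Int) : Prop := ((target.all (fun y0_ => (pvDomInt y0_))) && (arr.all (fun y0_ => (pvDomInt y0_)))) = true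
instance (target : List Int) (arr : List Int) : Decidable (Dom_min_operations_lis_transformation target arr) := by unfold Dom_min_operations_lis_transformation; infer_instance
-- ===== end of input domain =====

-- B replaces A's patience-sorting/bisect LIS with the classic quadratic DP table; same mapping preprocessing (objective: alternative).
-- ===== PORT A =====
-- target_pos = {val: i for i, val in enumerate(target)}   (shared preprocessing, used by both ports)
def pvTargetPos (target : List Int) : PySem.Dict Int Int :=
  (PySem.List.enumerate target 0).foldl (fun d iv => d.insert iv.2 iv.1) PySem.Dict.empty

-- one iteration of A's patience loop: idx = bisect_left(tails, num); append or overwrite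
def pvLisStep (tails : List Int) (num : Int) : List Int :=
  let idx := PySem.List.bisectLeft tails num
  if idx = tails.length then tails ++ [num] else tails.set idx num

-- def lis_binary_search(nums)
def pvLisBinarySearch (nums : List Int) : Int :=
  if nums = [] then 0
  else ((nums.foldl pvLisStep []).length : Int)

def min_operations_lis_transformation (target : List Int) (arr : List Int) : Int :=
  let target_pos := pvTargetPos target
  let positions := arr.foldl (fun acc v => if target_pos.contains v then acc ++ [target_pos.getD v 0] else acc) []
  let max_common := pvLisBinarySearch positions
  (target.length : Int) - max_common

-- ===== PORT B =====
-- inner scan: m = max d over earlier (q, d) with q < p; then append (p, m + 1)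
def pvDpStep (table : List (Int × Int)) (p : Int) : List (Int × Int) :=
  let m := table.foldl (fun m qd => if qd.1 < p ∧ qd.2 > m then qd.2 else m) (0 : Int)
  table ++ [(p, m + 1)]

def min_operations_lis_transformation_alt (target : List Int) (arr : List Int) : Int :=
  let target_pos := pvTargetPos target
  let positions := (arr.filter (fun v => target_pos.contains v)).map (fun v => target_pos.getD v 0)
  let table := positions.foldl pvDpStep []
  let best := table.foldl (fun b qd => if qd.2 > b then qd.2 else b) (0 : Int)
  (target.length : Int) - best

-- ===== PRECONDITION & SPEC =====
def Spec_min_operations_lis_transformation (target : List Int) (arr : List Int) (out : Int) : Prop := out = min_operations_lis_transformation_alt target arr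
instance (target : List Int) (arr : List Int) (out : Int) : Decidable (Spec_min_operations_lis_transformation target arr out) := by unfold Spec_min_operations_lis_transformation; infer_instance

-- ===== CLAIM (what is proved, stated in full; the proofs are below) =====
def Claim_equal_min_operations_lis_transformation : Prop := ∀ (target : List Int) (arr : List Int), Dom_min_operations_lis_transformation target arr → Spec_min_operations_lis_transformation target arr (min_operations_lis_transformation target arr)

-- ===== LEMMAS AND PROOFS =====

-- running maximum of the dp values recorded in a table, restricted to entries with first component < v
def pvM (table : List (Int × Int)) (v : Int) : Int :=
  table.foldl (fun m qd => if qd.1 < v then max m qd.2 else m) 0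

theorem pvM_step (table : List (Int × Int)) (p : Int) :
    table.foldl (fun m qd => if qd.1 < p ∧ qd.2 > m then qd.2 else m) (0 : Int) = pvM table p := by
  unfold pvM
  congr 1
  funext m qd
  by_cases h1 : qd.1 < p <;> by_cases h2 : qd.2 > m <;> simp [h1, h2] <;> omega

theorem pvM_append (table : List (Int × Int)) (p d v : Int) :
    pvM (table ++ [(p, d)]) v = if p < v then max (pvM table v) d else pvM table v := by
  unfold pvM
  rw [List.foldl_append]
  simp

theorem pvDpStep_eq (table : List (Int × Int)) (p : Int) :
    pvDpStep table p = table ++ [(p, pvM table p + 1)] := by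
  unfold pvDpStep
  rw [pvM_step]

theorem map_fst_foldl_dp (xs : List Int) (t : List (Int × Int)) :
    (xs.foldl pvDpStep t).map (·.1) = t.map (·.1) ++ xs := by
  induction xs generalizing t with
  | nil => simp
  | cons x xs ih =>
    rw [List.foldl_cons, ih, pvDpStep_eq]
    simp

-- the main invariant over the processed prefix xs
def pvInv (xs : List Int) : Prop :=
  (xs.foldl pvLisStep []).Pairwise (· < ·) ∧
  (∀ t ∈ xs.foldl pvLisStep [], t ∈ xs) ∧
  (∀ v : Int, ((xs.foldl pvLisStep []).countP (fun t => t < v) : Int) = pvM (xs.foldl pvDpStep []) v)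

theorem pvInv_nil : pvInv [] := by
  refine ⟨by simp, by simp, ?_⟩
  intro v
  simp [pvM]

-- one patience step keeps the tails strictly sorted
theorem pvStep_sorted (tails : List Int) (num : Int) (hsort : tails.Pairwise (· < ·)) :
    (pvLisStep tails num).Pairwise (· < ·) := by
  obtain ⟨hle, hlt, hge⟩ := PySem.List.bisectLeft_spec tails num (hsort.imp (fun h => le_of_lt h))
  set idx := PySem.List.bisectLeft tails num with hidx
  have hmono := List.pairwise_iff_getElem.mp hsort
  unfold pvLisStep
  rw [← hidx]
  by_cases hcase : idx = tails.length
  · rw [if_pos hcase, List.pairwise_append]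
    refine ⟨hsort, List.pairwise_singleton _ _, ?_⟩
    intro a ha b hb
    rw [List.mem_singleton] at hb
    subst hb
    obtain ⟨j, hj, rfl⟩ := List.getElem_of_mem ha
    exact hlt j hj (by omega)
  · have hlen : idx < tails.length := by omega
    rw [if_neg hcase, List.set_eq_take_append_cons_drop, if_pos hlen, List.pairwise_append]
    refine ⟨List.Pairwise.sublist (List.take_sublist _ _) hsort, ?_, ?_⟩
    · rw [List.pairwise_cons]
      refine ⟨?_, List.Pairwise.sublist (List.drop_sublist _ _) hsort⟩
      intro b hb
      obtain ⟨j, hj, rfl⟩ := List.mem_drop_iff_getElem.mp hb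
      calc num ≤ tails[idx] := hge idx hlen (le_refl _)
        _ < tails[idx + 1 + j] := hmono idx (idx + 1 + j) hlen (by omega) (by omega)
    · intro a ha b hb
      obtain ⟨j, hj, rfl⟩ := List.mem_take_iff_getElem.mp ha
      rw [List.mem_cons] at hb
      rcases hb with rfl | hb
      · exact hlt j (by omega) (by omega)
      · obtain ⟨j', hj', rfl⟩ := List.mem_drop_iff_getElem.mp hb
        exact hmono j (idx + 1 + j') (by omega) (by omega) (by omega)

theorem pvStep_mem (tails : List Int) (num : Int) (t : Int) (ht : t ∈ pvLisStep tails num) :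
    t ∈ tails ∨ t = num := by
  simp only [pvLisStep] at ht
  split at ht
  · rw [List.mem_append, List.mem_singleton] at ht
    exact ht
  · exact List.mem_or_eq_of_mem_set ht

-- how one patience step changes the number of tails below an arbitrary threshold v
theorem pvStep_countP (tails : List Int) (num : Int) (hsort : tails.Pairwise (· < ·)) (v : Int) :
    ((pvLisStep tails num).countP (fun t => t < v) : Int)
      = if num < v then
          max ((tails.countP (fun t => t < v) : Int)) ((tails.countP (fun t => t < num) : Int) + 1)
        else (tails.countP (fun t => t < v) : Int) := by
  obtain ⟨hle, hlt, hge⟩ := PySem.List.bisectLeft_spec tails num (hsort.imp (fun h => le_of_lt h))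
  set idx := PySem.List.bisectLeft tails num with hidx
  have hmono := List.pairwise_iff_getElem.mp hsort
  unfold pvLisStep
  rw [← hidx]
  by_cases hcase : idx = tails.length
  · -- append: every tail is < num
    have hall : ∀ t ∈ tails, t < num := by
      intro t ht
      obtain ⟨j, hj, rfl⟩ := List.getElem_of_mem ht
      exact hlt j hj (by omega)
    have hcnum : tails.countP (fun t => t < num) = tails.length :=
      List.countP_eq_length.mpr (by intro a ha; simpa using hall a ha)
    rw [if_pos hcase, List.countP_append]
    simp only [List.countP_cons, List.countP_nil, decide_eq_true_eq]
    by_cases hnv : num < v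
    · have hcv : tails.countP (fun t => decide (t < v)) = tails.length := by
        apply List.countP_eq_length.mpr
        intro a ha
        have := hall a ha
        simp
        omega
      rw [if_pos hnv, if_pos hnv, hcv, hcnum]
      push_cast
      omega
    · rw [if_neg hnv, if_neg hnv]
      push_cast
      omega
  · have hlen : idx < tails.length := by omega
    have hnumle : num ≤ tails[idx] := hge idx hlen (le_refl _)
    have htails : tails = tails.take idx ++ tails[idx] :: tails.drop (idx + 1) := by
      rw [List.getElem_cons_drop, List.take_append_drop]
    have htake_lt : ∀ a ∈ tails.take idx, a < num := by
      intro a ha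
      obtain ⟨j, hj, rfl⟩ := List.mem_take_iff_getElem.mp ha
      exact hlt j (by omega) (by omega)
    have hdrop_gt : ∀ a ∈ tails.drop (idx + 1), tails[idx] < a := by
      intro a ha
      obtain ⟨j, hj, rfl⟩ := List.mem_drop_iff_getElem.mp ha
      exact hmono idx (idx + 1 + j) hlen (by omega) (by omega)
    rw [if_neg hcase, List.set_eq_take_append_cons_drop, if_pos hlen]
    have hTlen : (tails.take idx).length = idx := by
      rw [List.length_take]; omega
    -- count over the original list, decomposed
    have hdec : ∀ w : Int, tails.countP (fun t => t < w)
        = (tails.take idx).countP (fun t => t < w)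
          + ((if tails[idx] < w then 1 else 0) + (tails.drop (idx + 1)).countP (fun t => t < w)) := by
      intro w
      conv_lhs => rw [htails]
      rw [List.countP_append, List.countP_cons]
      simp only [decide_eq_true_eq]
      omega
    have hdec' : (List.take idx tails ++ num :: List.drop (idx + 1) tails).countP (fun t => t < v)
        = (tails.take idx).countP (fun t => t < v)
          + ((if num < v then 1 else 0) + (tails.drop (idx + 1)).countP (fun t => t < v)) := by
      rw [List.countP_append, List.countP_cons]
      simp only [decide_eq_true_eq]
      omega
    -- count below num: exactly idx
    have hcnum : tails.countP (fun t => t < num) = idx := by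
      rw [hdec num]
      have h1 : (tails.take idx).countP (fun t => decide (t < num)) = idx := by
        have hall' : ∀ a ∈ tails.take idx, (fun t => decide (t < num)) a = true := by
          intro a ha; simpa using htake_lt a ha
        rw [List.countP_eq_length.mpr hall', hTlen]
      have h2 : (tails.drop (idx + 1)).countP (fun t => t < num) = 0 := by
        rw [List.countP_eq_zero]
        intro a ha
        have := hdrop_gt a ha
        simp
        omega
      rw [h1, h2, if_neg (by omega)]
      omega
    rw [hdec', hdec v]
    by_cases hnv : num < v
    · have h1 : (tails.take idx).countP (fun t => decide (t < v)) = idx := by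
        have hall' : ∀ a ∈ tails.take idx, (fun t => decide (t < v)) a = true := by
          intro a ha
          have := htake_lt a ha
          simp
          omega
        rw [List.countP_eq_length.mpr hall', hTlen]
      by_cases hiv : tails[idx] < v
      · rw [if_pos hnv, if_pos hnv, if_pos hiv, hcnum, h1]
        push_cast
        omega
      · have h2 : (tails.drop (idx + 1)).countP (fun t => t < v) = 0 := by
          rw [List.countP_eq_zero]
          intro a ha
          have := hdrop_gt a ha
          simp
          omega
        rw [if_pos hnv, if_pos hnv, if_neg hiv, hcnum, h1, h2]
        push_cast
        omega
    · rw [if_neg hnv, if_neg hnv, if_neg (by omega : ¬ tails[idx] < v)]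

theorem pvInv_step (xs : List Int) (num : Int) (h : pvInv xs) : pvInv (xs ++ [num]) := by
  obtain ⟨hsort, hmem, hc⟩ := h
  unfold pvInv
  rw [List.foldl_append, List.foldl_append]
  simp only [List.foldl_cons, List.foldl_nil]
  refine ⟨pvStep_sorted _ _ hsort, ?_, ?_⟩
  · intro t ht
    rcases pvStep_mem _ _ _ ht with h' | rfl
    · exact List.mem_append_left _ (hmem t h')
    · exact List.mem_append_right _ (List.mem_singleton_self _)
  · intro v
    rw [pvStep_countP _ _ hsort v, pvDpStep_eq, pvM_append, hc v, hc num]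

theorem pvInv_all (xs : List Int) : pvInv xs := by
  induction xs using List.reverseRecOn with
  | nil => exact pvInv_nil
  | append_singleton xs x ih => exact pvInv_step xs x ih

theorem lis_eq_dp (nums : List Int) :
    pvLisBinarySearch nums
      = (nums.foldl pvDpStep []).foldl (fun b qd => if qd.2 > b then qd.2 else b) (0 : Int) := by
  obtain ⟨hsort, hmem, hc⟩ := pvInv_all nums
  by_cases hnil : nums = []
  · subst hnil
    simp [pvLisBinarySearch]
  · set v : Int := nums.foldl max 0 + 1 with hv
    have hbound : ∀ x ∈ nums, x < v := by
      intro x hx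
      have := (PySem.List.le_foldl_max nums 0).2 x hx
      omega
    have h1 : (nums.foldl pvLisStep []).countP (fun t => t < v)
        = (nums.foldl pvLisStep []).length := by
      rw [List.countP_eq_length]
      intro a ha
      simpa using hbound a (hmem a ha)
    have h2 : (nums.foldl pvDpStep []).foldl (fun b qd => if qd.2 > b then qd.2 else b) (0 : Int)
        = pvM (nums.foldl pvDpStep []) v := by
      unfold pvM
      apply PySem.List.foldl_congr_mem
      intro acc qd hqd
      have hfst : qd.1 ∈ nums := by
        have : qd.1 ∈ (nums.foldl pvDpStep []).map (·.1) := List.mem_map_of_mem hqd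
        rw [map_fst_foldl_dp] at this
        simpa using this
      rw [if_pos (hbound qd.1 hfst)]
      split_ifs <;> omega
    rw [h2, ← hc v, pvLisBinarySearch, if_neg hnil, h1]

-- ===== VERDICT (by name: the statement is the Claim_ definition above) =====
theorem min_operations_lis_transformation_spec : Claim_equal_min_operations_lis_transformation := by
  intro target arr _
  unfold Spec_min_operations_lis_transformation
  simp only [min_operations_lis_transformation, min_operations_lis_transformation_alt]
  rw [PySem.List.foldl_append_if, List.nil_append, lis_eq_dp]
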